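-- pv_equiv track=rewrite | github.com/Utsav-Lal/Personal-Projects | MusicExpander/iden.py | iden
-- ===== SOURCE A (Python) =====
-- def iden(notelst):
--     major = [0, 4, 7]
--     minor = [0, 3, 7]
--     maj7 = [0, 4, 7, 10]
--     min7 = [0, 3, 7, 10]
--     dim7 = [0, 3, 6, 9]
--     chordlist = [major, minor, maj7, min7, dim7]
--     maxamount = 0
--     chord = None
--     for i in chordlist:
--         for j in range(0, 12):
--             totamount = 0
--             for n in notelst:
--                 if (n-j) % 12 in i:
--                     totamount += 1
--             if totamount > maxamount:
--                 maxamount = totamount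
--                 chord = [(j+c) % 12 for c in i]
--
--
--     return chord
-- ===== SOURCE B (Python) =====
-- def iden(notelst):
--     # Build a 12-bin pitch-class counter once, tabulate all 60 (chord,root)
--     # candidates with their scores, then return the first candidate with the
--     # maximal positive score.
--     bins = {}
--     for n in notelst:
--         bins[n % 12] = bins.get(n % 12, 0) + 1
--     chordlist = [[0, 4, 7], [0, 3, 7], [0, 4, 7, 10], [0, 3, 7, 10], [0, 3, 6, 9]]
--     cands = [(sum(bins.get((j + c) % 12, 0) for c in i), [(j + c) % 12 for c in i])
--              for i in chordlist for j in range(12)]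
--     best = max(s for s, _ in cands)
--     if best == 0:
--         return None
--     for s, ch in cands:
--         if s == best:
--             return ch
-- ===== Notes on version B (the rewrite author's own statement) =====
-- stated objective: faster
-- what changed: Instead of an online running-max that rescans the whole note list for each of the 60 (chord, root) pairs, B builds a 12-bin pitch-class counter in one pass, tabulates all 60 candidates with scores from 3-4 bin lookups each, and returns the first candidate with the maximal positive score.
import Mathlib
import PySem

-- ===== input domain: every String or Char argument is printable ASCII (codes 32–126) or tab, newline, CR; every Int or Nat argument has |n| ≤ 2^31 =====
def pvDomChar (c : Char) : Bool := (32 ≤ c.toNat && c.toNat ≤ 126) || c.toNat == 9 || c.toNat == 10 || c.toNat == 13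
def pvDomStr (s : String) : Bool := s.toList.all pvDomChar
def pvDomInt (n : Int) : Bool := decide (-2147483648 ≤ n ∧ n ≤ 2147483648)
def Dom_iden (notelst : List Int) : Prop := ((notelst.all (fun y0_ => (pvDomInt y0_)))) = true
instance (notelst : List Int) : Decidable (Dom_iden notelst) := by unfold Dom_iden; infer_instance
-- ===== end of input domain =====

-- B replaces A's online running-max over 60 rescans of notelst by a one-pass 12-bin
-- pitch-class counter, a table of the 60 scored candidates, and a first-max selection
-- (alternative decomposition; same return value).

-- ===== PORT A =====
def iden (notelst : List Int) : Option (List Int) :=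
  let major : List Int := [0, 4, 7]
  let minor : List Int := [0, 3, 7]
  let maj7 : List Int := [0, 4, 7, 10]
  let min7 : List Int := [0, 3, 7, 10]
  let dim7 : List Int := [0, 3, 6, 9]
  let chordlist := [major, minor, maj7, min7, dim7]
  let st :=
    chordlist.foldl (fun (st : Int × Option (List Int)) i =>
      (PySem.List.pyRange 0 12 1).foldl (fun st j =>
        let totamount :=
          notelst.foldl (fun t n => if PySem.Int.mod (n - j) 12 ∈ i then t + 1 else t) (0 : Int)
        if totamount > st.1 then (totamount, some (i.map (fun c => PySem.Int.mod (j + c) 12)))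
        else st) st) (0, none)
  st.2

-- ===== PORT B =====
-- helper: the bins dict built by B's first loop (bins[n % 12] = bins.get(n % 12, 0) + 1)
def idenBins (notelst : List Int) : PySem.Dict Int Int :=
  notelst.foldl
    (fun d n => d.insert (PySem.Int.mod n 12) (d.getD (PySem.Int.mod n 12) 0 + 1))
    PySem.Dict.empty

def iden_alt (notelst : List Int) : Option (List Int) :=
  let bins := idenBins notelst
  let chordlist : List (List Int) := [[0, 4, 7], [0, 3, 7], [0, 4, 7, 10], [0, 3, 7, 10], [0, 3, 6, 9]]
  let cands := chordlist.flatMap (fun i =>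
    (PySem.List.pyRange 0 12 1).map (fun j =>
      (i.foldl (fun t c => t + bins.getD (PySem.Int.mod (j + c) 12) 0) (0 : Int),
       i.map (fun c => PySem.Int.mod (j + c) 12))))
  -- cands has 60 entries, so Python's max never raises; .getD 0 only totalizes the port
  let best := (PySem.List.max? (cands.map Prod.fst) (fun y => y)).getD 0
  if best == 0 then none
  else (cands.find? (fun p => p.1 == best)).map Prod.snd

-- ===== PRECONDITION & SPEC =====
def Spec_iden (notelst : List Int) (out : Option (List Int)) : Prop := out = iden_alt notelst
instance (notelst : List Int) (out : Option (List Int)) : Decidable (Spec_iden notelst out) := by unfold Spec_iden; infer_instance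

-- ===== CLAIM (what is proved, stated in full; the proofs are below) =====
def Claim_equal_iden : Prop := ∀ (notelst : List Int), Dom_iden notelst → Spec_iden notelst (iden notelst)

-- ===== LEMMAS AND PROOFS =====

-- A's running-max step, on an already-scored candidate
def stepc (st : Int × Option (List Int)) (p : Int × List Int) : Int × Option (List Int) :=
  if p.1 > st.1 then (p.1, some p.2) else st

-- the common candidate table, scored by A's method (rescan of notelst)
def candsN (notelst : List Int) : List (Int × List Int) :=
  [[0, 4, 7], [0, 3, 7], [0, 4, 7, 10], [0, 3, 7, 10], ([0, 3, 6, 9] : List Int)].flatMap (fun i =>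
    (PySem.List.pyRange 0 12 1).map (fun j =>
      (notelst.foldl (fun t n => if PySem.Int.mod (n - j) 12 ∈ i then t + 1 else t) (0 : Int),
       i.map (fun c => PySem.Int.mod (j + c) 12))))

theorem mod12 (a : Int) : PySem.Int.mod a 12 = a % 12 :=
  PySem.Int.mod_eq_emod_of_pos (by norm_num)

theorem sub_emod_left12 (x y : Int) : (x % 12 - y) % 12 = (x - y) % 12 := by
  rw [Int.sub_emod, Int.emod_emod_of_dvd _ dvd_rfl, ← Int.sub_emod]

theorem add_emod_right12 (x y : Int) : (x + y % 12) % 12 = (x + y) % 12 := by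
  rw [Int.add_emod, Int.emod_emod_of_dvd _ dvd_rfl, ← Int.add_emod]

theorem emod_shift_iff (j c r : Int) (h1 : 0 ≤ c) (h2 : c < 12) (h3 : 0 ≤ r) (h4 : r < 12) :
    (j + c) % 12 = r ↔ c = (r - j) % 12 := by
  constructor
  · intro h
    have : (r - j) % 12 = c := by
      calc (r - j) % 12 = ((j + c) - j) % 12 := by rw [← h, sub_emod_left12]
        _ = c % 12 := by congr 1; ring
        _ = c := Int.emod_eq_of_lt h1 h2
    exact this.symm
  · intro h
    calc (j + c) % 12 = (j + (r - j)) % 12 := by rw [h, add_emod_right12]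
      _ = r % 12 := by congr 1; ring
      _ = r := Int.emod_eq_of_lt h3 h4

theorem foldl_if_countP (p : Int → Prop) [DecidablePred p] (l : List Int) (t : Int) :
    l.foldl (fun t n => if p n then t + 1 else t) t
      = t + (l.countP (fun n => decide (p n)) : Int) := by
  induction l generalizing t with
  | nil => simp
  | cons x l ih =>
    by_cases h : p x <;> simp [h, ih] <;> ring

theorem foldl_add_sum (g : Int → Int) (i : List Int) (t : Int) :
    i.foldl (fun t c => t + g c) t = t + (i.map g).sum := by
  induction i generalizing t with
  | nil => simp
  | cons x l ih => simp only [List.foldl_cons, ih, List.map_cons, List.sum_cons]; ring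

theorem countP_eq_single (i : List Int) (hn : i.Nodup) (x : Int) :
    i.countP (fun c => decide (c = x)) = if x ∈ i then 1 else 0 := by
  induction i with
  | nil => simp
  | cons a l ih =>
    rcases List.nodup_cons.mp hn with ⟨ha, hl⟩
    by_cases hx : x = a
    · subst hx
      have hz : l.countP (fun c => decide (c = x)) = 0 :=
        List.countP_eq_zero.mpr (fun c hc => by
          simp only [decide_eq_true_eq]; rintro rfl; exact ha hc)
      simp [hz]
    · simp [ih hl, List.mem_cons, hx, Ne.symm hx]

theorem sum_map_count_cons (i : List Int) (m' : List Int) (r : Int) (f : Int → Int) :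
    (i.map (fun c => (r :: m').count (f c))).sum
      = (i.map (fun c => m'.count (f c))).sum + i.countP (fun c => decide (f c = r)) := by
  induction i with
  | nil => simp
  | cons a l ih =>
    simp only [List.map_cons, List.sum_cons, List.countP_cons]
    rw [ih, List.count_cons]
    by_cases h : f a = r
    · simp only [h, beq_self_eq_true, if_true, decide_true]
      omega
    · have hb : (r == f a) = false := by simp [Ne.symm h]
      simp only [hb, Bool.false_eq_true, if_false, decide_eq_true_eq, h]
      omega

theorem main_count (m : List Int) (hm : ∀ r ∈ m, 0 ≤ r ∧ r < 12)
    (i : List Int) (hn : i.Nodup) (hb : ∀ c ∈ i, 0 ≤ c ∧ c < 12) (j : Int) :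
    m.countP (fun r => decide ((r - j) % 12 ∈ i))
      = (i.map (fun c => m.count ((j + c) % 12))).sum := by
  induction m with
  | nil => simp
  | cons r m' ih =>
    have hr := hm r (by simp)
    have hm' : ∀ x ∈ m', 0 ≤ x ∧ x < 12 := fun x hx => hm x (List.mem_cons_of_mem _ hx)
    rw [List.countP_cons, sum_map_count_cons, ih hm']
    congr 1
    have hcongr : i.countP (fun c => decide ((j + c) % 12 = r))
        = i.countP (fun c => decide (c = (r - j) % 12)) :=
      List.countP_congr (fun c hc => by
        rcases hb c hc with ⟨h1, h2⟩
        simp only [decide_eq_true_eq]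
        exact emod_shift_iff j c r h1 h2 hr.1 hr.2)
    rw [hcongr, countP_eq_single i hn]
    simp

theorem cast_sum_map (f : Int → Nat) (l : List Int) :
    (l.map (fun c => (f c : Int))).sum = ((l.map f).sum : Int) := by
  induction l with
  | nil => simp
  | cons x l ih => simp [ih]

theorem bins_getD_aux (l : List Int) (d : PySem.Dict Int Int) (v : Int) :
    (l.foldl (fun d n => d.insert (n % 12) (d.getD (n % 12) 0 + 1)) d).getD v 0
      = d.getD v 0 + ((l.map (fun n => n % 12)).count v : Int) := by
  induction l generalizing d with
  | nil => simp
  | cons n l ih =>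
    simp only [List.foldl_cons, ih, List.map_cons, List.count_cons]
    rw [PySem.Dict.getD_insert]
    by_cases h : v = n % 12
    · subst h
      simp only [beq_self_eq_true, if_true]
      push_cast; ring
    · have hb : (n % 12 == v) = false := by simp [Ne.symm h]
      simp only [if_neg h, hb, Bool.false_eq_true, if_false]
      push_cast; ring

theorem bins_getD (notelst : List Int) (v : Int) :
    (idenBins notelst).getD v 0 = ((notelst.map (fun n => n % 12)).count v : Int) := by
  unfold idenBins
  simp only [mod12]
  rw [bins_getD_aux]
  simp

-- A's rescan score equals B's bins score, per chord shape and root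
theorem inner_eq (notelst : List Int) (i : List Int) (hn : i.Nodup)
    (hb : ∀ c ∈ i, 0 ≤ c ∧ c < 12) (j : Int) :
    notelst.foldl (fun t n => if (n - j) % 12 ∈ i then t + 1 else t) (0 : Int)
      = i.foldl (fun t c => t + (idenBins notelst).getD ((j + c) % 12) 0) (0 : Int) := by
  rw [foldl_if_countP (fun n => (n - j) % 12 ∈ i), foldl_add_sum]
  simp only [zero_add]
  have hb' : (fun c => (idenBins notelst).getD ((j + c) % 12) 0)
      = (fun c => (((notelst.map (fun n => n % 12)).count ((j + c) % 12) : Nat) : Int)) :=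
    funext fun c => bins_getD notelst ((j + c) % 12)
  rw [hb', cast_sum_map]
  rw [← main_count (notelst.map (fun n => n % 12))
      (by
        intro r hr
        rcases List.mem_map.mp hr with ⟨n, _, rfl⟩
        exact ⟨Int.emod_nonneg n (by norm_num), Int.emod_lt_of_pos n (by norm_num)⟩)
      i hn hb j]
  rw [List.countP_map]
  congr 1
  refine List.countP_congr (fun n _ => ?_)
  simp only [Function.comp_apply]
  rw [sub_emod_left12]

-- per-shape equality of scored candidate rows
theorem row_eq (notelst : List Int) (i : List Int) (hn : i.Nodup)
    (hb : ∀ c ∈ i, 0 ≤ c ∧ c < 12) :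
    (PySem.List.pyRange 0 12 1).map (fun j =>
      (i.foldl (fun t c => t + (idenBins notelst).getD ((j + c) % 12) 0) (0 : Int),
       i.map (fun c => (j + c) % 12)))
    = (PySem.List.pyRange 0 12 1).map (fun j =>
      (notelst.foldl (fun t n => if (n - j) % 12 ∈ i then t + 1 else t) (0 : Int),
       i.map (fun c => (j + c) % 12))) :=
  List.map_congr_left (fun j _ => by rw [inner_eq notelst i hn hb j])

-- A's nested loops ARE the running-max fold over the candidate table
theorem A_eq (notelst : List Int) :
    iden notelst = ((candsN notelst).foldl stepc (0, none)).2 := by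
  unfold iden candsN
  simp only [List.flatMap_cons, List.flatMap_nil, List.append_nil, List.foldl_append,
    List.foldl_map, List.foldl_cons, List.foldl_nil, stepc]

-- B's candidate table equals the common one
theorem B_cands_eq (notelst : List Int) :
    ([[0, 4, 7], [0, 3, 7], [0, 4, 7, 10], [0, 3, 7, 10], ([0, 3, 6, 9] : List Int)]).flatMap (fun i =>
      (PySem.List.pyRange 0 12 1).map (fun j =>
        (i.foldl (fun t c => t + (idenBins notelst).getD (PySem.Int.mod (j + c) 12) 0) (0 : Int),
         i.map (fun c => PySem.Int.mod (j + c) 12))))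
    = candsN notelst := by
  unfold candsN
  simp only [mod12, List.flatMap_cons, List.flatMap_nil]
  rw [row_eq notelst [0, 4, 7] (by decide) (by decide),
      row_eq notelst [0, 3, 7] (by decide) (by decide),
      row_eq notelst [0, 4, 7, 10] (by decide) (by decide),
      row_eq notelst [0, 3, 7, 10] (by decide) (by decide),
      row_eq notelst [0, 3, 6, 9] (by decide) (by decide)]

-- the running-max fold selects the first candidate achieving the max, if it beats m
theorem fold_sel (L : List (Int × List Int)) (m : Int) (ch : Option (List Int)) :
    L.foldl stepc (m, ch)
      = (if m < (L.map Prod.fst).foldl max m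
          then ((L.map Prod.fst).foldl max m,
                (L.find? (fun p => p.1 == (L.map Prod.fst).foldl max m)).map Prod.snd)
          else (m, ch)) := by
  induction L generalizing m ch with
  | nil => simp
  | cons q T ih =>
    simp only [List.foldl_cons, List.map_cons, List.find?_cons, stepc]
    by_cases hq : q.1 > m
    · have hmax : max m q.1 = q.1 := by omega
      rw [if_pos hq, ih q.1 (some q.2), hmax]
      have hle : q.1 ≤ (T.map Prod.fst).foldl max q.1 := (PySem.List.le_foldl_max _ _).1
      by_cases hlt : q.1 < (T.map Prod.fst).foldl max q.1
      · have hne : (q.1 == (T.map Prod.fst).foldl max q.1) = false := by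
          simp; omega
        rw [if_pos hlt, if_pos (by omega), hne]
      · have heq : (T.map Prod.fst).foldl max q.1 = q.1 := by omega
        rw [if_neg hlt, heq, if_pos hq]
        simp
    · have hmax : max m q.1 = m := by omega
      rw [if_neg hq, ih m ch, hmax]
      by_cases hlt : m < (T.map Prod.fst).foldl max m
      · have hle : m ≤ (T.map Prod.fst).foldl max m := le_of_lt hlt
        have hne : (q.1 == (T.map Prod.fst).foldl max m) = false := by
          simp; omega
        rw [if_pos hlt, if_pos hlt, hne]
      · rw [if_neg hlt, if_neg hlt]

-- all candidate scores are nonnegative (they are counts)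
theorem cands_nonneg (notelst : List Int) :
    ∀ p ∈ candsN notelst, 0 ≤ p.1 := by
  intro p hp
  unfold candsN at hp
  rcases List.mem_flatMap.mp hp with ⟨i, _, hpi⟩
  rcases List.mem_map.mp hpi with ⟨j, _, rfl⟩
  simp only
  rw [foldl_if_countP (fun n => PySem.Int.mod (n - j) 12 ∈ i)]
  positivity

-- the selection agrees with B's max-then-first-match on a nonempty nonneg table
theorem sel_eq (L : List (Int × List Int)) (h0 : ∀ p ∈ L, 0 ≤ p.1) (hne : L ≠ []) :
    (L.foldl stepc (0, none)).2
      = (if ((PySem.List.max? (L.map Prod.fst) (fun y => y)).getD 0 == 0) then none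
         else (L.find? (fun p => p.1 == (PySem.List.max? (L.map Prod.fst) (fun y => y)).getD 0)).map
                Prod.snd) := by
  cases L with
  | nil => exact absurd rfl hne
  | cons q T =>
    have hq0 : 0 ≤ q.1 := h0 q (by simp)
    have hM : ((q :: T).map Prod.fst).foldl max 0 = (T.map Prod.fst).foldl max q.1 := by
      simp only [List.map_cons, List.foldl_cons]
      congr 1
      omega
    have hbest : (PySem.List.max? ((q :: T).map Prod.fst) (fun y => y)).getD 0
        = (T.map Prod.fst).foldl max q.1 := by
      simp only [List.map_cons, PySem.List.max?_id_cons, Option.getD_some]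
    have hle : q.1 ≤ (T.map Prod.fst).foldl max q.1 := (PySem.List.le_foldl_max _ _).1
    rw [fold_sel, hM, hbest]
    by_cases hlt : 0 < (T.map Prod.fst).foldl max q.1
    · have hne0 : ((T.map Prod.fst).foldl max q.1 == 0) = false := by simp; omega
      rw [if_pos hlt, hne0]
      simp
    · have heq : (T.map Prod.fst).foldl max q.1 = 0 := by omega
      rw [if_neg hlt, heq]
      simp

theorem candsN_ne_nil (notelst : List Int) : candsN notelst ≠ [] := by
  unfold candsN
  simp [List.flatMap_cons, PySem.List.pyRange]

-- ===== VERDICT (by name: the statement is the Claim_ definition above) =====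
theorem iden_spec : Claim_equal_iden := by
  intro notelst _
  unfold Spec_iden
  rw [A_eq]
  show _ = iden_alt notelst
  simp only [iden_alt]
  rw [B_cands_eq]
  exact sel_eq (candsN notelst) (cands_nonneg notelst) (candsN_ne_nil notelst)
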